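-- pv_equiv track=rewrite | github.com/keqi-1/writen_examination | qvnar.py | third_sum
-- ===== SOURCE A (Python) =====
-- def third_sum(nums):
--     n = len(nums)
--     third = []
--     for i in range(n - 2):
--         if i + 2 >= n:
--             break
--         tag = 0
--         for j in range(i + 1, n - 1):
--             if j + 1 >= n:
--                 break
--             for k in range(j + 1, n):
--                 t = nums[i] + nums[j] + nums[k]
--                 if t - 3 * (t // 3) == 0:
--                     third.append(nums[i])
--                     third.append(nums[j])
--                     third.append(nums[k])
--                     f1, f2, f3 = nums[i], nums[j], nums[k]
--                     nums.remove(f1)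
--                     nums.remove(f2)
--                     nums.remove(f3)
--                     n -= 3
--                     tag = 1
--                     break
--             if tag == 1:
--                 break
--     return third, nums
-- ===== SOURCE B (Python) =====
-- def third_sum(nums):
--     # Residue-class next-occurrence table per outer step: for each i, find the
--     # first (j, k) with (nums[i]+nums[j]+nums[k]) % 3 == 0 in O(n) instead of
--     # scanning all (j, k) pairs.  Mutates nums in place like the original.
--     n0 = len(nums)
--     third = []
--     for i in range(n0 - 2):
--         n = len(nums)
--         if i + 2 >= n:
--             break
--         # rev, built back-to-front: rev[-1] after processing p is the triple
--         # (first index >= p with residue 0, ... 1, ... 2), n meaning "none".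
--         rev = [(n, n, n)]
--         for p in reversed(range(n)):
--             a, b, c = rev[-1]
--             r = nums[p] % 3
--             rev.append((p if r == 0 else a, p if r == 1 else b, p if r == 2 else c))
--         nxt = rev[::-1]  # nxt[q] = next-occurrence triple for position q
--         ri = nums[i] % 3
--         hit = None
--         for j in range(i + 1, n - 1):
--             c = (-ri - nums[j]) % 3
--             k = nxt[j + 1][c]
--             if k < n:
--                 hit = (j, k)
--                 break
--         if hit is not None:
--             j, k = hit
--             f1, f2, f3 = nums[i], nums[j], nums[k]
--             third.extend((f1, f2, f3))
--             nums.remove(f1)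
--             nums.remove(f2)
--             nums.remove(f3)
--     return third, nums
-- ===== Notes on version B (the rewrite author's own statement) =====
-- stated objective: alternative
-- what changed: For each outer index i, B builds a residue-class next-occurrence table once and finds the first valid (j,k) by an O(n) scan with O(1) lookups, instead of A's nested j,k double scan.
import Mathlib
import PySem

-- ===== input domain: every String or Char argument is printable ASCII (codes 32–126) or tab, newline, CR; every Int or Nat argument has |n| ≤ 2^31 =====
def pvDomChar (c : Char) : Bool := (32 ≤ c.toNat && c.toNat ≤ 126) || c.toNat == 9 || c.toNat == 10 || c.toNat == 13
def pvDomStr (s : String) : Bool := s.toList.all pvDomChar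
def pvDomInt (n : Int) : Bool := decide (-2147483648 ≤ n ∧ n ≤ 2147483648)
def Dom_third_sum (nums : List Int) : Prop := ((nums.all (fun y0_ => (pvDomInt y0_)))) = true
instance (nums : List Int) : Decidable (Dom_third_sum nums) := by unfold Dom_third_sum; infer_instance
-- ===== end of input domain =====

-- B replaces A's nested (j,k) double scan per outer step by a residue-class
-- next-occurrence table plus a single j scan (alternative algorithm; return-value
-- equivalence only: the Python originals also mutate `nums` in place, identically).

-- ===== PORT A =====
-- `xs[idx]`: every index these loops use is in range, so the .getD default is never taken
def pvAt (xs : List Int) (idx : Int) : Int := (PySem.List.pyGet? xs idx).getD 0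

-- the three nums.remove calls (shared verbatim by both Pythons); .remove never
-- raises here since each removed value is present, so the .getD fallback is never taken
def pvRemove3 (nums : List Int) (f1 f2 f3 : Int) : List Int :=
  let n1 := (PySem.List.remove? nums f1).getD nums
  let n2 := (PySem.List.remove? n1 f2).getD n1
  (PySem.List.remove? n2 f3).getD n2

-- innermost `for k` loop: first k with (nums[i]+nums[j]+nums[k]) - 3*(t//3) == 0
def aFindK (nums : List Int) (i j : Int) : List Int → Option Int
  | [] => none
  | k :: ks =>
      let t := pvAt nums i + pvAt nums j + pvAt nums k
      if t - 3 * (PySem.Int.floordiv t 3) = 0 then some k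
      else aFindK nums i j ks

-- `for j` loop with its `if j + 1 >= n: break` and tag-break
def aFindJK (nums : List Int) (n i : Int) : List Int → Option (Int × Int)
  | [] => none
  | j :: js =>
      if j + 1 ≥ n then none
      else
        match aFindK nums i j (PySem.List.pyRange (j + 1) n 1) with
        | some k => some (j, k)
        | none => aFindJK nums n i js

-- one outer-loop iteration; Bool = the `break` having fired
def aStep (s : List Int × List Int × Int × Bool) (i : Int) : List Int × List Int × Int × Bool :=
  match s with
  | (third, nums, n, done) =>
    if done then (third, nums, n, done)
    else if i + 2 ≥ n then (third, nums, n, true)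
    else
      match aFindJK nums n i (PySem.List.pyRange (i + 1) (n - 1) 1) with
      | none => (third, nums, n, false)
      | some (j, k) =>
          let f1 := pvAt nums i
          let f2 := pvAt nums j
          let f3 := pvAt nums k
          (third ++ [f1, f2, f3], pvRemove3 nums f1 f2 f3, n - 3, false)

def third_sum (nums : List Int) : List Int × List Int :=
  let n : Int := nums.length
  let s := (PySem.List.pyRange 0 (n - 2) 1).foldl aStep ([], nums, n, false)
  (s.1, s.2.1)

-- ===== PORT B =====
-- one row of the next-occurrence table: position p of residue r consed onto the row for p+1
def bRow (p r : Int) (l : Int × Int × Int) : Int × Int × Int :=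
  (if r = 0 then p else l.1, if r = 1 then p else l.2.1, if r = 2 then p else l.2.2)

-- `for p in reversed(range(n)): rev.append(...)`
def bRevLoop (nums : List Int) (n : Int) : List Int → List (Int × Int × Int) → List (Int × Int × Int)
  | [], acc => acc
  | p :: ps, acc =>
      let l := acc.getLastD (n, n, n)
      let r := PySem.Int.mod (pvAt nums p) 3
      bRevLoop nums n ps (acc ++ [bRow p r l])

-- python tuple indexing nxt[q][c] with c in {0,1,2}
def bSel (t : Int × Int × Int) (c : Int) : Int :=
  if c = 0 then t.1 else if c = 1 then t.2.1 else t.2.2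

-- `for j` loop: table lookup instead of an inner scan
def bFindJK (nums : List Int) (nxt : List (Int × Int × Int)) (n ri : Int) : List Int → Option (Int × Int)
  | [] => none
  | j :: js =>
      let c := PySem.Int.mod (-ri - pvAt nums j) 3
      let k := bSel ((PySem.List.pyGet? nxt (j + 1)).getD (n, n, n)) c
      if k < n then some (j, k) else bFindJK nums nxt n ri js

def bStep (s : List Int × List Int × Bool) (i : Int) : List Int × List Int × Bool :=
  match s with
  | (third, nums, done) =>
    if done then (third, nums, done)
    else
      let n : Int := nums.length
      if i + 2 ≥ n then (third, nums, true)
      else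
        let rev := bRevLoop nums n ((PySem.List.pyRange 0 n 1).reverse) [(n, n, n)]
        let nxt := (PySem.List.slice? rev none none (-1)).getD []   -- rev[::-1]
        let ri := PySem.Int.mod (pvAt nums i) 3
        match bFindJK nums nxt n ri (PySem.List.pyRange (i + 1) (n - 1) 1) with
        | none => (third, nums, false)
        | some (j, k) =>
            let f1 := pvAt nums i
            let f2 := pvAt nums j
            let f3 := pvAt nums k
            (third ++ [f1, f2, f3], pvRemove3 nums f1 f2 f3, false)

def third_sum_alt (nums : List Int) : List Int × List Int :=
  let n0 : Int := nums.length
  let s := (PySem.List.pyRange 0 (n0 - 2) 1).foldl bStep ([], nums, false)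
  (s.1, s.2.1)

-- ===== PRECONDITION & SPEC =====
def Spec_third_sum (nums : List Int) (out : List Int × List Int) : Prop := out = third_sum_alt nums
instance (nums : List Int) (out : List Int × List Int) : Decidable (Spec_third_sum nums out) := by unfold Spec_third_sum; infer_instance

-- ===== CLAIM (what is proved, stated in full; the proofs are below) =====
def Claim_equal_third_sum : Prop := ∀ (nums : List Int), Dom_third_sum nums → Spec_third_sum nums (third_sum nums)

-- ===== LEMMAS AND PROOFS =====

-- proof-side spec of B's table row for position n - f (fuel f = distance from the end)
def rowSpec (nums : List Int) (n : Int) : Nat → Int × Int × Int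
  | 0 => (n, n, n)
  | f + 1 => bRow (n - (f + 1)) (PySem.Int.mod (pvAt nums (n - (f + 1))) 3) (rowSpec nums n f)

-- proof-side spec of the whole table: rows for positions n-f .. n-1 plus the sentinel
def mkRows (nums : List Int) (n : Int) : Nat → List (Int × Int × Int)
  | 0 => [(n, n, n)]
  | f + 1 => rowSpec nums n (f + 1) :: mkRows nums n f

theorem pv_mod3 (x : Int) : PySem.Int.mod x 3 = x % 3 :=
  PySem.Int.mod_eq_emod_of_pos (by norm_num)

theorem pv_fdiv3 (x : Int) : PySem.Int.floordiv x 3 = x / 3 :=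
  PySem.Int.floordiv_eq_ediv_of_pos (by norm_num)

theorem bSel_sentinel (n c : Int) : bSel (n, n, n) c = n := by
  unfold bSel; split_ifs <;> rfl

theorem bSel_bRow (p r c : Int) (l : Int × Int × Int) (hr0 : 0 ≤ r) (hr3 : r < 3)
    (hc0 : 0 ≤ c) (hc3 : c < 3) :
    bSel (bRow p r l) c = if r = c then p else bSel l c := by
  have hr : r = 0 ∨ r = 1 ∨ r = 2 := by omega
  have hc : c = 0 ∨ c = 1 ∨ c = 2 := by omega
  rcases hr with h | h | h <;> rcases hc with h' | h' | h' <;>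
    subst h <;> subst h' <;> simp [bSel, bRow]

theorem mkRows_getElem? (nums : List Int) (n : Int) (f q : Nat) (h : q ≤ f) :
    (mkRows nums n f)[q]? = some (rowSpec nums n (f - q)) := by
  induction f generalizing q with
  | zero => interval_cases q; rfl
  | succ f ih =>
    cases q with
    | zero => rfl
    | succ q => simpa [mkRows] using ih q (by omega)

theorem bRevLoop_spec (nums : List Int) (N : Nat) (m : Nat) (hm : m ≤ N) :
    bRevLoop nums (N : Int) ((PySem.List.pyRange 0 (m : Int) 1).reverse)
      ((mkRows nums (N : Int) (N - m)).reverse) = (mkRows nums (N : Int) N).reverse := by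
  induction m with
  | zero => simp [PySem.List.pyRange_one_eq_nil, bRevLoop]
  | succ m ih =>
    have hr : PySem.List.pyRange 0 ((m : Int) + 1) 1
        = PySem.List.pyRange 0 (m : Int) 1 ++ [(m : Int)] :=
      PySem.List.pyRange_one_succ_right (by positivity)
    have hcast : ((m + 1 : Nat) : Int) = (m : Int) + 1 := by push_cast; ring
    rw [hcast, hr, List.reverse_append]
    simp only [List.reverse_cons, List.reverse_nil, List.nil_append, List.singleton_append,
      bRevLoop]
    have hlast : ((mkRows nums (N : Int) (N - (m + 1))).reverse).getLastD
        ((N : Int), (N : Int), (N : Int)) = rowSpec nums (N : Int) (N - (m + 1)) := by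
      rw [List.getLastD_eq_getLast?, List.getLast?_reverse]
      cases hf : (N - (m + 1)) with
      | zero => simp [mkRows, rowSpec]
      | succ f => simp [mkRows]
    rw [hlast]
    have hsplit : N - m = (N - (m + 1)) + 1 := by omega
    have hpos : (N : Int) - ((N - (m + 1) : Nat) + 1 : Nat) = (m : Int) := by
      push_cast [Nat.cast_sub (by omega : m + 1 ≤ N)]; ring
    have hrow : rowSpec nums (N : Int) (N - m)
        = bRow (m : Int) (PySem.Int.mod (pvAt nums (m : Int)) 3)
            (rowSpec nums (N : Int) (N - (m + 1))) := by
      rw [hsplit]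
      show bRow ((N : Int) - ((N - (m + 1) : Nat) + 1))
          (PySem.Int.mod (pvAt nums ((N : Int) - ((N - (m + 1) : Nat) + 1))) 3) _ = _
      rw [show ((N : Int) - ((N - (m + 1) : Nat) + 1)) = (m : Int) by
        push_cast [Nat.cast_sub (by omega : m + 1 ≤ N)]; ring]
    have : (mkRows nums (N : Int) (N - (m + 1))).reverse
          ++ [bRow (m : Int) (PySem.Int.mod (pvAt nums (m : Int)) 3)
                (rowSpec nums (N : Int) (N - (m + 1)))]
        = (mkRows nums (N : Int) (N - m)).reverse := by
      rw [hrow.symm, hsplit]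
      show _ = (rowSpec nums (N : Int) ((N - (m+1)) + 1) :: mkRows nums (N : Int) (N - (m+1))).reverse
      rw [List.reverse_cons]
    rw [this]
    exact ih (by omega)

-- the table computed by B's port is exactly mkRows
theorem bTable_eq (nums : List Int) :
    (PySem.List.slice?
      (bRevLoop nums (nums.length : Int)
        ((PySem.List.pyRange 0 (nums.length : Int) 1).reverse)
        [((nums.length : Int), (nums.length : Int), (nums.length : Int))])
      none none (-1)).getD []
    = mkRows nums (nums.length : Int) nums.length := by
  have h0 : [((nums.length : Int), (nums.length : Int), (nums.length : Int))]
      = (mkRows nums (nums.length : Int) (nums.length - nums.length)).reverse := by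
    simp [mkRows]
  rw [h0, bRevLoop_spec nums nums.length nums.length le_rfl,
      PySem.List.slice?_none_none_neg_one]
  simp

-- A's innermost scan from position n - f agrees with the table lookup
theorem findK_eq (nums : List Int) (i j : Int) (N : Nat) (f : Nat) (hf : f ≤ N) :
    aFindK nums i j (PySem.List.pyRange ((N : Int) - (f : Int)) (N : Int) 1)
      = (let c := PySem.Int.mod (-(PySem.Int.mod (pvAt nums i) 3) - pvAt nums j) 3
         let kk := bSel (rowSpec nums (N : Int) f) c
         if kk < (N : Int) then some kk else none) := by
  induction f with
  | zero =>
    simp only [Nat.cast_zero, sub_zero]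
    rw [PySem.List.pyRange_one_eq_nil le_rfl]
    simp [aFindK, rowSpec, bSel_sentinel]
  | succ f ih =>
    have hm : (N : Int) - ((f : Int) + 1) < (N : Int) := by omega
    have hcast : ((f + 1 : Nat) : Int) = (f : Int) + 1 := by push_cast; ring
    rw [hcast, PySem.List.pyRange_one_cons hm]
    simp only [aFindK]
    have hrow : rowSpec nums (N : Int) (f + 1)
        = bRow ((N : Int) - ((f : Int) + 1))
            (PySem.Int.mod (pvAt nums ((N : Int) - ((f : Int) + 1))) 3)
            (rowSpec nums (N : Int) f) := by
      show bRow ((N : Int) - ((f : Nat) + 1 : Nat)) _ _ = _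
      rw [show (((f : Nat) + 1 : Nat) : Int) = (f : Int) + 1 by push_cast; ring]
    set c := PySem.Int.mod (-(PySem.Int.mod (pvAt nums i) 3) - pvAt nums j) 3 with hc
    set r := PySem.Int.mod (pvAt nums ((N : Int) - ((f : Int) + 1))) 3 with hrdef
    have hc0 : 0 ≤ c ∧ c < 3 := by rw [hc, pv_mod3]; omega
    have hr0 : 0 ≤ r ∧ r < 3 := by rw [hrdef, pv_mod3]; omega
    have hcond :
        (pvAt nums i + pvAt nums j + pvAt nums ((N : Int) - ((f : Int) + 1))
          - 3 * PySem.Int.floordiv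
              (pvAt nums i + pvAt nums j + pvAt nums ((N : Int) - ((f : Int) + 1))) 3 = 0)
        ↔ r = c := by
      rw [hrdef, hc, pv_fdiv3, pv_mod3, pv_mod3, pv_mod3]
      omega
    rw [hrow]
    by_cases h : r = c
    · rw [if_pos (hcond.mpr h)]
      have : bSel (bRow ((N : Int) - ((f : Int) + 1)) r (rowSpec nums (N : Int) f)) c
          = (N : Int) - ((f : Int) + 1) := by
        rw [bSel_bRow _ _ _ _ hr0.1 hr0.2 hc0.1 hc0.2, if_pos h]
      simp only [this]
      rw [if_pos hm]
    · rw [if_neg (fun hx => h (hcond.mp hx))]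
      have hsel : bSel (bRow ((N : Int) - ((f : Int) + 1)) r (rowSpec nums (N : Int) f)) c
          = bSel (rowSpec nums (N : Int) f) c := by
        rw [bSel_bRow _ _ _ _ hr0.1 hr0.2 hc0.1 hc0.2, if_neg h]
      simp only [hsel]
      have hnext : (N : Int) - ((f : Int) + 1) + 1 = (N : Int) - (f : Int) := by ring
      rw [hnext]
      exact ih (by omega)

-- the two j-scans agree
theorem findJK_eq (nums : List Int) (i : Int) (l : List Int)
    (hl : ∀ x ∈ l, 0 ≤ x ∧ x < (nums.length : Int) - 1) :
    aFindJK nums (nums.length : Int) i l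
      = bFindJK nums (mkRows nums (nums.length : Int) nums.length) (nums.length : Int)
          (PySem.Int.mod (pvAt nums i) 3) l := by
  induction l with
  | nil => rfl
  | cons j js ih =>
    obtain ⟨hj0, hj1⟩ := hl j (List.mem_cons_self ..)
    have hrec := ih (fun x hx => hl x (List.mem_cons_of_mem _ hx))
    simp only [aFindJK, bFindJK]
    rw [if_neg (by omega)]
    have htn : ((j + 1).toNat : Int) = j + 1 := by omega
    have hle : (j + 1).toNat ≤ nums.length := by omega
    have hget : (PySem.List.pyGet? (mkRows nums (nums.length : Int) nums.length) (j + 1)).getD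
          ((nums.length : Int), (nums.length : Int), (nums.length : Int))
        = rowSpec nums (nums.length : Int) (nums.length - (j + 1).toNat) := by
      rw [PySem.List.pyGet?_of_nonneg _ (by omega : (0:Int) ≤ j + 1),
          mkRows_getElem? nums _ nums.length ((j + 1).toNat) hle]
      rfl
    have hK := findK_eq nums i j nums.length (nums.length - (j + 1).toNat) (by omega)
    have hidx : (nums.length : Int) - ((nums.length - (j + 1).toNat : Nat) : Int) = j + 1 := by
      omega
    rw [hidx] at hK
    rw [hK, hget]
    set kk := bSel (rowSpec nums (nums.length : Int) (nums.length - (j + 1).toNat))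
      (PySem.Int.mod (-PySem.Int.mod (pvAt nums i) 3 - pvAt nums j) 3) with hkk
    by_cases h : kk < (nums.length : Int)
    · rw [if_pos h, if_pos h]
    · rw [if_neg h, if_neg h]; exact hrec

theorem findK_mem (nums : List Int) (i j k : Int) (l : List Int)
    (h : aFindK nums i j l = some k) : k ∈ l := by
  induction l with
  | nil => simp [aFindK] at h
  | cons x xs ih =>
    simp only [aFindK] at h
    split at h
    · cases h; exact List.mem_cons_self ..
    · exact List.mem_cons_of_mem _ (ih h)

theorem findJK_mem (nums : List Int) (n i j k : Int) (l : List Int)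
    (h : aFindJK nums n i l = some (j, k)) :
    j ∈ l ∧ k ∈ PySem.List.pyRange (j + 1) n 1 := by
  induction l with
  | nil => simp [aFindJK] at h
  | cons x xs ih =>
    simp only [aFindJK] at h
    split at h
    · exact absurd h (by simp)
    · split at h
      · rename_i k' hk'
        cases h
        exact ⟨List.mem_cons_self .., findK_mem _ _ _ _ _ hk'⟩
      · obtain ⟨h1, h2⟩ := ih h
        exact ⟨List.mem_cons_of_mem _ h1, h2⟩

theorem count_split (xs : List Int) (m : Nat) (h : m < xs.length) (v : Int) :
    xs.count v
      = (xs.take m).count v + (if xs[m] = v then 1 else 0) + (xs.drop (m + 1)).count v := by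
  conv_lhs => rw [← List.take_append_drop m xs]
  rw [List.drop_eq_getElem_cons h, List.count_append, List.count_cons]
  simp only [beq_iff_eq]
  split_ifs <;> omega

theorem count_ge2 (xs : List Int) (a b : Nat) (hab : a < b) (hb : b < xs.length) (v : Int) :
    (if xs[a] = v then 1 else 0) + (if xs[b] = v then 1 else 0) ≤ xs.count v := by
  rw [count_split xs b hb v]
  have hmem : xs[a] ∈ xs.take b := by
    have ha : (xs.take b)[a]'(by simp; omega) = xs[a] := List.getElem_take
    exact ha ▸ List.getElem_mem _
  by_cases hv : xs[a] = v
  · have : 0 < (xs.take b).count v := List.count_pos_iff.mpr (hv ▸ hmem)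
    split_ifs <;> omega
  · split_ifs <;> omega

theorem count_ge3 (xs : List Int) (a b c : Nat) (hab : a < b) (hbc : b < c)
    (hc : c < xs.length) (v : Int) :
    (if xs[a] = v then 1 else 0) + (if xs[b] = v then 1 else 0)
      + (if xs[c] = v then 1 else 0) ≤ xs.count v := by
  rw [count_split xs c hc v]
  have hlt : (xs.take c).length = c := List.length_take_of_le (by omega)
  have h2 := count_ge2 (xs.take c) a b hab (by omega) v
  simp only [List.getElem_take] at h2
  split_ifs at * <;> omega

-- the three removals: they are the three erasures, and drop the length by 3
theorem pvRemove3_spec (xs : List Int) (a b c : Nat) (hab : a < b) (hbc : b < c)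
    (hc : c < xs.length) :
    pvRemove3 xs xs[a] xs[b] xs[c] = ((xs.erase xs[a]).erase xs[b]).erase xs[c]
      ∧ (pvRemove3 xs xs[a] xs[b] xs[c]).length + 3 = xs.length := by
  have h1 : xs[a] ∈ xs := List.getElem_mem _
  have hcnt2 := count_ge2 xs a b hab (by omega) xs[b]
  have hcnt3 := count_ge3 xs a b c hab hbc hc xs[c]
  have hce1 : ∀ v : Int, (xs.erase xs[a]).count v = xs.count v - if v = xs[a] then 1 else 0 := by
    intro v
    rw [List.count_erase]
    simp only [beq_iff_eq]
    split_ifs <;> omega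
  have h2 : xs[b] ∈ xs.erase xs[a] := by
    rw [← List.count_pos_iff, hce1]
    split_ifs at * <;> omega
  have hce2 : ∀ v : Int, ((xs.erase xs[a]).erase xs[b]).count v
      = xs.count v - (if v = xs[a] then 1 else 0) - if v = xs[b] then 1 else 0 := by
    intro v
    rw [List.count_erase, hce1]
    simp only [beq_iff_eq]
    split_ifs <;> omega
  have h3 : xs[c] ∈ (xs.erase xs[a]).erase xs[b] := by
    rw [← List.count_pos_iff, hce2]
    split_ifs at * <;> omega
  have e1 : PySem.List.remove? xs xs[a] = some (xs.erase xs[a]) :=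
    PySem.List.remove?_eq_some_erase _ _ h1
  have e2 : PySem.List.remove? (xs.erase xs[a]) xs[b] = some ((xs.erase xs[a]).erase xs[b]) :=
    PySem.List.remove?_eq_some_erase _ _ h2
  have e3 : PySem.List.remove? ((xs.erase xs[a]).erase xs[b]) xs[c]
      = some (((xs.erase xs[a]).erase xs[b]).erase xs[c]) :=
    PySem.List.remove?_eq_some_erase _ _ h3
  have heq : pvRemove3 xs xs[a] xs[b] xs[c] = ((xs.erase xs[a]).erase xs[b]).erase xs[c] := by
    simp only [pvRemove3, e1, e2, e3, Option.getD_some]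
  refine ⟨heq, ?_⟩
  rw [heq, List.length_erase_of_mem h3, List.length_erase_of_mem h2,
      List.length_erase_of_mem h1]
  omega

-- pvAt at a nonnegative in-range index is getElem
theorem pvAt_eq (xs : List Int) (i : Int) (h0 : 0 ≤ i) (h1 : i < (xs.length : Int)) :
    pvAt xs i = xs[i.toNat]'(by omega) := by
  unfold pvAt
  rw [PySem.List.pyGet?_of_nonneg _ h0, List.getElem?_eq_getElem (by omega)]
  rfl

-- one outer iteration: A's state is B's state plus the tracked length
theorem step_eq (third nums : List Int) (d : Bool) (i : Int) (hi : 0 ≤ i) :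
    aStep (third, nums, (nums.length : Int), d) i
      = ((bStep (third, nums, d) i).1, (bStep (third, nums, d) i).2.1,
         ((bStep (third, nums, d) i).2.1.length : Int), (bStep (third, nums, d) i).2.2) := by
  cases d with
  | true => rfl
  | false =>
    by_cases hbr : i + 2 ≥ (nums.length : Int)
    · simp [aStep, bStep, hbr]
    · have hfind : bFindJK nums
          ((PySem.List.slice?
            (bRevLoop nums (nums.length : Int)
              ((PySem.List.pyRange 0 (nums.length : Int) 1).reverse)
              [((nums.length : Int), (nums.length : Int), (nums.length : Int))])
            none none (-1)).getD [])
          (nums.length : Int) (PySem.Int.mod (pvAt nums i) 3)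
          (PySem.List.pyRange (i + 1) ((nums.length : Int) - 1) 1)
          = aFindJK nums (nums.length : Int) i
              (PySem.List.pyRange (i + 1) ((nums.length : Int) - 1) 1) := by
        rw [bTable_eq]
        exact (findJK_eq nums i _ (fun x hx => by
          have := (PySem.List.mem_pyRange_one).mp hx
          omega)).symm
      simp only [aStep, bStep, if_neg Bool.false_ne_true, if_neg hbr, hfind]
      cases hres : aFindJK nums (nums.length : Int) i
          (PySem.List.pyRange (i + 1) ((nums.length : Int) - 1) 1) with
      | none => rfl
      | some jk =>
        obtain ⟨j, k⟩ := jk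
        obtain ⟨hjmem, hkmem⟩ := findJK_mem nums _ i j k _ hres
        have hjb := (PySem.List.mem_pyRange_one).mp hjmem
        have hkb := (PySem.List.mem_pyRange_one).mp hkmem
        have hia : 0 ≤ i ∧ i < (nums.length : Int) := ⟨hi, by omega⟩
        have hab : i.toNat < j.toNat := by omega
        have hbc : j.toNat < k.toNat := by omega
        have hcl : k.toNat < nums.length := by omega
        have hfa := pvAt_eq nums i hi (by omega)
        have hfb := pvAt_eq nums j (by omega) (by omega)
        have hfc := pvAt_eq nums k (by omega) (by omega)
        have hsp := pvRemove3_spec nums i.toNat j.toNat k.toNat hab hbc hcl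
        simp only []
        rw [hfa, hfb, hfc]
        have hlen : ((pvRemove3 nums (nums[i.toNat]'(by omega)) (nums[j.toNat]'(by omega))
            (nums[k.toNat]'(by omega))).length : Int) = (nums.length : Int) - 3 := by
          have := hsp.2
          omega
        rw [hlen]

-- the whole folds agree, maintaining n = len(nums)
theorem fold_eq (l : List Int) (hl : ∀ x ∈ l, 0 ≤ x) :
    ∀ (third nums : List Int) (d : Bool),
    l.foldl aStep (third, nums, (nums.length : Int), d)
      = ((l.foldl bStep (third, nums, d)).1, (l.foldl bStep (third, nums, d)).2.1,
         (((l.foldl bStep (third, nums, d)).2.1.length : Int)),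
         (l.foldl bStep (third, nums, d)).2.2) := by
  induction l with
  | nil => intro third nums d; rfl
  | cons x xs ih =>
    intro third nums d
    rw [List.foldl_cons, List.foldl_cons,
        step_eq third nums d x (hl x (List.mem_cons_self ..))]
    rcases bStep (third, nums, d) x with ⟨t', m', d'⟩
    exact ih (fun y hy => hl y (List.mem_cons_of_mem _ hy)) t' m' d'

theorem third_sum_spec : Claim_equal_third_sum := by
  unfold Claim_equal_third_sum Spec_third_sum
  intro nums _
  unfold third_sum third_sum_alt
  simp only []
  rw [fold_eq (PySem.List.pyRange 0 ((nums.length : Int) - 2) 1)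
      (fun x hx => ((PySem.List.mem_pyRange_one).mp hx).1) [] nums false]
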